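-- pv_equiv track=rewrite | github.com/LiteML-Edge/lmedg | pipelines/runner.py | collect_upstream
-- ===== SOURCE A (Python) =====
-- from typing import Dict, List, Set, Optional
--
-- def collect_upstream(targets: Set[str], rev_graph: Dict[str, Set[str]]) -> Set[str]:
--     """Collect direct/indirect dependencies upstream (step->deps)."""
--     out = set()
--     frontier = list(targets)
--     while frontier:
--         n = frontier.pop(0)
--         if n in out:
--             continue
--         out.add(n)
--         for d in rev_graph.get(n, set()):
--             frontier.append(d)
--     return out
-- ===== SOURCE B (Python) =====
-- def collect_upstream(targets, rev_graph):
--     """Collect direct/indirect dependencies upstream (step->deps)."""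
--     out = set()
--     frontier = list(targets)
--     while frontier:
--         nxt = []
--         for n in frontier:
--             if n not in out:
--                 out.add(n)
--                 nxt.extend(rev_graph.get(n, ()))
--         frontier = nxt
--     return out
-- ===== Notes on version B (the rewrite author's own statement) =====
-- stated objective: faster
-- what changed: Replaces A's one-node-at-a-time FIFO worklist with its O(queue) list.pop(0) per visit by level-synchronous frontier expansion: each pass marks every unseen node of the current level and gathers their deps into the next frontier list.
import Mathlib
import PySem

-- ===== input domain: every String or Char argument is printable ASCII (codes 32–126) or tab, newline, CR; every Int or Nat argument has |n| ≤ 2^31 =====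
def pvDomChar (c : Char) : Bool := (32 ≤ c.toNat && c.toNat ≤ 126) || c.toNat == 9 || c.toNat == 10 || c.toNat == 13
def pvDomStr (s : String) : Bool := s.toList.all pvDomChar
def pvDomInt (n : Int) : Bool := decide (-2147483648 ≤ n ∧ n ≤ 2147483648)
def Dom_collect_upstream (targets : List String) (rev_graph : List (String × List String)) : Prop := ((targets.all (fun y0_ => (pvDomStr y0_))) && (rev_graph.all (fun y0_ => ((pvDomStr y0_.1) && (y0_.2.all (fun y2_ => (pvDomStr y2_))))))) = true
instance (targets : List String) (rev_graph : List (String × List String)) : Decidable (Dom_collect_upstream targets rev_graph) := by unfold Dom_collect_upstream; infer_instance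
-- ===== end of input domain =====

-- B replaces A's one-at-a-time FIFO worklist (with its O(queue) pop(0) per node) by
-- level-synchronous frontier expansion, visiting the same nodes in the same order.


-- ===== PORT A =====
-- rev_graph.get(n, set()) on the association-list dict (first match)
def upDeps (rev_graph : List (String × List String)) (n : String) : List String :=
  (PySem.Dict.mk rev_graph).getD n []

-- the universe of strings that can ever enter a frontier (targets and all dep values);
-- used only as a termination measure.  The 'n ∈ U' test below is a totality guard:
-- every value actually popped comes from targets or a deps list, so on every call
-- reachable from collect_upstream it is true and the computation is exactly A's.
def upUniv (targets : List String) (rev_graph : List (String × List String)) : Finset String :=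
  (targets ++ rev_graph.flatMap (fun p => p.2)).toFinset

-- termination helpers for the loops (cited by their decreasing_by)
theorem pvToFinset_add (out : PySem.Set String) (n : String) :
    (PySem.Set.add out n).toFinset = insert n out.toFinset := by
  rw [PySem.Set.add_eq_ite]
  split
  · simp_all
  · simp [List.toFinset_append]

theorem pvCard_add_lt (U : Finset String) (out : PySem.Set String) (n : String)
    (hU : n ∈ U) (hn : n ∉ out) :
    (U \ (PySem.Set.add out n).toFinset).card < (U \ out.toFinset).card := by
  rw [pvToFinset_add, Finset.sdiff_insert]
  exact Finset.card_erase_lt_of_mem (by simp [Finset.mem_sdiff, hU, hn])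

theorem pvCard_add_eq (U : Finset String) (out : PySem.Set String) (n : String)
    (hU : n ∉ U) :
    (U \ (PySem.Set.add out n).toFinset).card = (U \ out.toFinset).card := by
  rw [pvToFinset_add, Finset.sdiff_insert, Finset.erase_eq_self.mpr]
  simp [Finset.mem_sdiff, hU]

-- the while-loop of A: pop the head, skip if seen, else mark it and append its deps
def upLoop (rev_graph : List (String × List String)) (U : Finset String)
    (out : PySem.Set String) (frontier : List String) : PySem.Set String :=
  match frontier with
  | [] => out
  | n :: rest =>
    if out.contains n then upLoop rev_graph U out rest
    else if n ∈ U then upLoop rev_graph U (PySem.Set.add out n) (rest ++ upDeps rev_graph n)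
    else upLoop rev_graph U (PySem.Set.add out n) rest
termination_by ((U \ out.toFinset).card, frontier.length)
decreasing_by
  · exact Prod.Lex.right _ (by simp)
  · rename_i hc hU
    exact Prod.Lex.left _ _
      (pvCard_add_lt U out n hU (fun h => hc ((PySem.Set.contains_iff out n).mpr h)))
  · rename_i hc hU
    apply Prod.Lex.right'
    · exact le_of_eq (pvCard_add_eq U out n hU)
    · simp

def collect_upstream (targets : List String) (rev_graph : List (String × List String)) : List String :=
  upLoop rev_graph (upUniv targets rev_graph) PySem.Set.empty targets

-- ===== PORT B =====
-- the body of B's inner for-loop over one level: mark each unseen node and gather its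
-- deps for the next level (same 'n ∈ U' totality guard as in A's port)
def altStep (rev_graph : List (String × List String)) (U : Finset String)
    (acc : PySem.Set String × List String) (n : String) : PySem.Set String × List String :=
  if acc.1.contains n then acc
  else (PySem.Set.add acc.1 n, acc.2 ++ (if n ∈ U then upDeps rev_graph n else []))

-- termination helper for B's while-loop (cited by its decreasing_by)
theorem altStep_of_mem (rev_graph : List (String × List String)) (U : Finset String)
    (acc : PySem.Set String × List String) (n : String) (h : n ∈ acc.1) :
    altStep rev_graph U acc n = acc := by
  simp [altStep, h]

theorem altStep_of_not_mem (rev_graph : List (String × List String)) (U : Finset String)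
    (acc : PySem.Set String × List String) (n : String) (h : n ∉ acc.1) :
    altStep rev_graph U acc n
      = (PySem.Set.add acc.1 n, acc.2 ++ (if n ∈ U then upDeps rev_graph n else [])) := by
  simp [altStep, h]

theorem pvAltFold_card (rev_graph : List (String × List String)) (U : Finset String) :
    ∀ (l : List String) (out : PySem.Set String) (nxt : List String),
      (U \ (l.foldl (altStep rev_graph U) (out, nxt)).1.toFinset).card
          < (U \ out.toFinset).card
      ∨ ((U \ (l.foldl (altStep rev_graph U) (out, nxt)).1.toFinset).card
          = (U \ out.toFinset).card
         ∧ (l.foldl (altStep rev_graph U) (out, nxt)).2 = nxt) := by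
  intro l
  induction l with
  | nil => intro out nxt; right; simp
  | cons n l IH =>
    intro out nxt
    rw [List.foldl_cons]
    by_cases hc : n ∈ out
    · rw [altStep_of_mem rev_graph U (out, nxt) n hc]
      exact IH out nxt
    · rw [altStep_of_not_mem rev_graph U (out, nxt) n hc]
      by_cases hU : n ∈ U
      · left
        have h1 := pvCard_add_lt U out n hU hc
        rcases IH (PySem.Set.add out n) (nxt ++ (if n ∈ U then upDeps rev_graph n else [])) with h | h
        · exact lt_trans h h1
        · exact h.1 ▸ h1
      · have h1 := pvCard_add_eq U out n hU
        rcases IH (PySem.Set.add out n) (nxt ++ (if n ∈ U then upDeps rev_graph n else [])) with h | h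
        · left; exact h1 ▸ h
        · right
          refine ⟨by rw [h.1, h1], ?_⟩
          rw [h.2]; simp [hU]

-- the while-loop of B: process a whole frontier level, then continue with the gathered next level
def altLoop (rev_graph : List (String × List String)) (U : Finset String)
    (out : PySem.Set String) (frontier : List String) : PySem.Set String :=
  if h : frontier = [] then out
  else
    let r := frontier.foldl (altStep rev_graph U) (out, [])
    altLoop rev_graph U r.1 r.2
termination_by ((U \ out.toFinset).card, frontier.length)
decreasing_by
  simp only [List.foldl_attach]
  rcases pvAltFold_card rev_graph U frontier out [] with hlt | ⟨heq, hsnd⟩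
  · exact Prod.Lex.left _ _ hlt
  · apply Prod.Lex.right'
    · exact le_of_eq heq
    · rw [hsnd]
      simpa using List.length_pos_iff.mpr h

def collect_upstream_alt (targets : List String) (rev_graph : List (String × List String)) : List String :=
  altLoop rev_graph (upUniv targets rev_graph) PySem.Set.empty targets

-- ===== PRECONDITION & SPEC =====
def Spec_collect_upstream (targets : List String) (rev_graph : List (String × List String)) (out : List String) : Prop := out = collect_upstream_alt targets rev_graph
instance (targets : List String) (rev_graph : List (String × List String)) (out : List String) : Decidable (Spec_collect_upstream targets rev_graph out) := by unfold Spec_collect_upstream; infer_instance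

-- ===== CLAIM (what is proved, stated in full; the proofs are below) =====
def Claim_equal_collect_upstream : Prop := ∀ (targets : List String) (rev_graph : List (String × List String)), Dom_collect_upstream targets rev_graph → Spec_collect_upstream targets rev_graph (collect_upstream targets rev_graph)

-- ===== LEMMAS AND PROOFS =====

theorem upLoop_nil (rev_graph : List (String × List String)) (U : Finset String)
    (out : PySem.Set String) : upLoop rev_graph U out [] = out := by
  rw [upLoop]

theorem upLoop_cons_mem (rev_graph : List (String × List String)) (U : Finset String)
    (out : PySem.Set String) (n : String) (rest : List String) (h : n ∈ out) :
    upLoop rev_graph U out (n :: rest) = upLoop rev_graph U out rest := by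
  rw [upLoop]; simp [h]

theorem upLoop_cons_new (rev_graph : List (String × List String)) (U : Finset String)
    (out : PySem.Set String) (n : String) (rest : List String) (h : n ∉ out) :
    upLoop rev_graph U out (n :: rest)
      = upLoop rev_graph U (PySem.Set.add out n)
          (rest ++ (if n ∈ U then upDeps rev_graph n else [])) := by
  rw [upLoop]
  by_cases hU : n ∈ U <;> simp [h, hU]

-- a level-fold started with a non-empty deps accumulator is the fold from [] with the
-- accumulated prefix in front
theorem altFold_snd (rev_graph : List (String × List String)) (U : Finset String) :
    ∀ (l : List String) (out : PySem.Set String) (nxt : List String),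
      l.foldl (altStep rev_graph U) (out, nxt)
        = ((l.foldl (altStep rev_graph U) (out, [])).1,
           nxt ++ (l.foldl (altStep rev_graph U) (out, [])).2) := by
  intro l
  induction l with
  | nil => intro out nxt; simp
  | cons n l IH =>
    intro out nxt
    rw [List.foldl_cons, List.foldl_cons]
    by_cases hc : n ∈ out
    · rw [altStep_of_mem rev_graph U (out, nxt) n hc, altStep_of_mem rev_graph U (out, []) n hc]
      exact IH out nxt
    · rw [altStep_of_not_mem rev_graph U (out, nxt) n hc,
         altStep_of_not_mem rev_graph U (out, []) n hc]
      rw [IH (PySem.Set.add out n) (nxt ++ _), IH (PySem.Set.add out n) ([] ++ _)]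
      simp [List.append_assoc]

-- A's queue processes one whole level (followed by anything already queued behind it)
-- exactly as B's level-fold does
theorem upLoop_level (rev_graph : List (String × List String)) (U : Finset String) :
    ∀ (level : List String) (out : PySem.Set String) (tail : List String),
      upLoop rev_graph U out (level ++ tail)
        = upLoop rev_graph U (level.foldl (altStep rev_graph U) (out, [])).1
            (tail ++ (level.foldl (altStep rev_graph U) (out, [])).2) := by
  intro level
  induction level with
  | nil => intro out tail; simp
  | cons n lvl IH =>
    intro out tail
    rw [List.cons_append, List.foldl_cons]
    by_cases hc : n ∈ out
    · rw [upLoop_cons_mem rev_graph U out n _ hc, altStep_of_mem rev_graph U (out, []) n hc]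
      exact IH out tail
    · rw [upLoop_cons_new rev_graph U out n _ hc, altStep_of_not_mem rev_graph U (out, []) n hc]
      rw [List.append_assoc, IH (PySem.Set.add out n) (tail ++ _)]
      rw [altFold_snd rev_graph U lvl (PySem.Set.add out n) ([] ++ _)]
      simp [List.append_assoc]

theorem upLoop_eq_altLoop (rev_graph : List (String × List String)) (U : Finset String)
    (out : PySem.Set String) (frontier : List String) :
    upLoop rev_graph U out frontier = altLoop rev_graph U out frontier := by
  induction out, frontier using altLoop.induct rev_graph U with
  | case1 out => rw [upLoop_nil, altLoop]; simp
  | case2 out frontier h r IH =>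
    rw [altLoop]
    simp only [h, dite_false]
    have hr : r = List.foldl (altStep rev_graph U) (out, []) frontier := by
      have hr0 : r = frontier.attach.foldl (fun s x => altStep rev_graph U s x.val) (out, []) := rfl
      rw [hr0, List.foldl_attach]
    rw [hr] at IH
    have hlv := upLoop_level rev_graph U frontier out []
    simp only [List.append_nil, List.nil_append] at hlv
    rw [hlv]
    exact IH

-- ===== VERDICT (by name: the statement is the Claim_ definition above) =====
theorem collect_upstream_spec : Claim_equal_collect_upstream := by
  intro targets rev_graph _
  unfold Spec_collect_upstream collect_upstream collect_upstream_alt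
  exact upLoop_eq_altLoop _ _ _ _
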